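-- pv_equiv track=rewrite | github.com/zanglab/CTCF_T-ALL_code | utilities/association_with_regions.py | get_overlap_info_regions2regions_numID
-- ===== SOURCE A (Python) =====
-- import re,bisect
--
-- def get_overlap_info_regions2regions_numID(islands,regions):
--     # for each island in islands[chrom], check if 1-overlap 0-non-overlap with regions[chrom]
--     overlapped,nonoverlapped = {},{}
--     for chrom in islands:
--         if chrom not in regions:
--             for island in islands[chrom]:
--                 if chrom not in nonoverlapped:
--                     nonoverlapped[chrom] = []
--                 nonoverlapped[chrom].append(island)
--         else:
--             # check the regions in regions[chrom] are non-overlap and sorted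
--             regionStart,regionEnd = [],[]
--             leftEnd=0
--             for region in regions[chrom]:
--                 assert leftEnd <= region[0]<=region[1]
--                 regionStart.append(region[0])
--                 regionEnd.append(region[1])
--                 leftEnd=region[1]
--
--             # for each island, check if overlapped with regions[chrom]
--             for island in islands[chrom]:
--                 assert island[0]<=island[1]
--                 e = bisect.bisect_left(regionEnd,island[0])
--                 s = bisect.bisect_right(regionStart,island[1])
--                 if s > e :
--                     if chrom not in overlapped:
--                         overlapped[chrom] = []
--                     overlapped[chrom].append(island)
--                 else:
--                     if chrom not in nonoverlapped:
--                         nonoverlapped[chrom] = []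
--                     nonoverlapped[chrom].append(island)
--                 #i+=1
--     return overlapped,nonoverlapped
-- ===== SOURCE B (Python) =====
-- def get_overlap_info_regions2regions_numID(islands, regions):
--     # alternative algorithm: per chromosome, sort islands by right end and sweep
--     # a single pointer across the sorted regions (no bisect); since regions are
--     # sorted and non-overlapping, the rightmost region with start <= island end
--     # has the largest end among candidates, so one end-comparison decides overlap
--     overlapped, nonoverlapped = {}, {}
--     for chrom, chrom_islands in islands.items():
--         if chrom not in regions:
--             if chrom_islands:
--                 nonoverlapped[chrom] = list(chrom_islands)
--             continue
--         rs = regions[chrom]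
--         left = 0
--         for s0, e0 in rs:
--             assert left <= s0 <= e0
--             left = e0
--         for s, e in chrom_islands:
--             assert s <= e
--         order = sorted(range(len(chrom_islands)), key=lambda k: chrom_islands[k][1])
--         verdict = [False] * len(chrom_islands)
--         j = 0
--         for k in order:
--             s, e = chrom_islands[k]
--             while j < len(rs) and rs[j][0] <= e:
--                 j += 1
--             verdict[k] = j > 0 and s <= rs[j - 1][1]
--         ov = [isl for v, isl in zip(verdict, chrom_islands) if v]
--         nov = [isl for v, isl in zip(verdict, chrom_islands) if not v]
--         if ov:
--             overlapped[chrom] = ov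
--         if nov:
--             nonoverlapped[chrom] = nov
--     return overlapped, nonoverlapped
-- ===== Notes on version B (the rewrite author's own statement) =====
-- stated objective: alternative
-- what changed: A answers each island independently with two binary searches (bisect_left on region ends vs bisect_right on region starts) and compares the two counts, appending islands one by one into lazily-created dict entries; B instead sorts each chromosome's islands by their right end and sweeps a single pointer linearly across the sorted regions (no binary search), records a verdict array, then partitions the islands and inserts each nonempty part into the result dict at once.
import Mathlib
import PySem

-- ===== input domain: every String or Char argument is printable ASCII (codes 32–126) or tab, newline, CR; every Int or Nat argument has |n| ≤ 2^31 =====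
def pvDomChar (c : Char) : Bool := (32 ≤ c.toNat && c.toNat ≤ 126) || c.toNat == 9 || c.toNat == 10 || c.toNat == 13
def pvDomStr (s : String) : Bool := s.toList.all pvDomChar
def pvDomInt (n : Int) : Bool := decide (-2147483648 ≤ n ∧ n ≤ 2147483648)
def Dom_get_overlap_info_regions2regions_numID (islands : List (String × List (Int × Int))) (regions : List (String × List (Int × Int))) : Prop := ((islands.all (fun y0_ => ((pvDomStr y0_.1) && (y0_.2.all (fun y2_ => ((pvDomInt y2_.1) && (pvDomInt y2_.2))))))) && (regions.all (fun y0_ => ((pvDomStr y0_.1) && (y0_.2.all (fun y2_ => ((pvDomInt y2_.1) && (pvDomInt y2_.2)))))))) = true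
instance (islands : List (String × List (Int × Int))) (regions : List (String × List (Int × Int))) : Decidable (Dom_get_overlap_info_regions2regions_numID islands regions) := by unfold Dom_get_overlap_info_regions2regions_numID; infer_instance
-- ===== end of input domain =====

-- B replaces A's per-island two-bisect count test by a different algorithm: per chromosome it
-- sorts the islands by right end and sweeps ONE pointer linearly across the sorted regions
-- (no binary search), then inserts each nonempty part at once (return values proven equal on Pre_).

-- ===== PORT A =====
-- the dicts are PySem.Dict built from the association lists (Python dict semantics);
-- A's asserts are not executed here: inputs on which they fire are excluded by Pre_ below.
def pvStepA (rdict : PySem.Dict String (List (Int × Int)))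
    (st : PySem.Dict String (List (Int × Int)) × PySem.Dict String (List (Int × Int)))
    (ci : String × List (Int × Int)) :
    PySem.Dict String (List (Int × Int)) × PySem.Dict String (List (Int × Int)) :=
  if rdict.contains ci.1 = false then
    -- 'if chrom not in nonoverlapped: …=[]; ….append(island)' is Dict.modify with default []
    (st.1, ci.2.foldl (fun nov island => nov.modify ci.1 [] (· ++ [island])) st.2)
  else
    -- build regionStart, regionEnd (and leftEnd, used only by the skipped assert)
    let pre := (rdict.getD ci.1 []).foldl
      (fun (acc : List Int × List Int × Int) region =>
        (acc.1 ++ [region.1], acc.2.1 ++ [region.2], region.2)) ([], [], 0)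
    let regionStart := pre.1
    let regionEnd := pre.2.1
    ci.2.foldl (fun st island =>
      let e := PySem.List.bisectLeft regionEnd island.1
      let s := PySem.List.bisectRight regionStart island.2
      if e < s then (st.1.modify ci.1 [] (· ++ [island]), st.2)
      else (st.1, st.2.modify ci.1 [] (· ++ [island]))) st

def get_overlap_info_regions2regions_numID (islands : List (String × List (Int × Int))) (regions : List (String × List (Int × Int))) : (List (String × List (Int × Int))) × (List (String × List (Int × Int))) :=
  let rdict := PySem.Dict.ofList regions
  let fin := (PySem.Dict.ofList islands).items.foldl (pvStepA rdict)
    (PySem.Dict.empty, PySem.Dict.empty)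
  (fin.1.items, fin.2.items)

-- ===== PORT B =====
-- 'while j < len(rs) and rs[j][0] <= e: j += 1'
def pvAdvance (rs : List (Int × Int)) (e : Int) (j : Nat) : Nat :=
  if h : j < rs.length then
    if rs[j].1 ≤ e then pvAdvance rs e (j + 1) else j
  else j
termination_by rs.length - j

-- one iteration of B's sweep loop over 'order'; islands are fetched by index
-- (always in range in Source B; getD is the harmless total form of that indexing)
def pvSweepStep (rs : List (Int × Int)) (l : List (Int × Int))
    (vj : List Bool × Nat) (k : Nat) : List Bool × Nat :=
  let island := l.getD k (0, 0)
  let j' := pvAdvance rs island.2 vj.2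
  (vj.1.set k (decide (0 < j') && decide (island.1 ≤ (rs.getD (j' - 1) (0, 0)).2)), j')

def pvStepB (rdict : PySem.Dict String (List (Int × Int)))
    (st : PySem.Dict String (List (Int × Int)) × PySem.Dict String (List (Int × Int)))
    (ci : String × List (Int × Int)) :
    PySem.Dict String (List (Int × Int)) × PySem.Dict String (List (Int × Int)) :=
  if rdict.contains ci.1 then
    let rs := rdict.getD ci.1 []
    -- order = sorted(range(len(chrom_islands)), key=lambda k: chrom_islands[k][1])
    let order := PySem.List.sorted (List.range ci.2.length) (fun k => (ci.2.getD k (0, 0)).2)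
    let fin := order.foldl (pvSweepStep rs ci.2) (List.replicate ci.2.length false, 0)
    let ov := ((fin.1.zip ci.2).filter (·.1)).map (·.2)
    let nov := ((fin.1.zip ci.2).filter (fun p => !p.1)).map (·.2)
    (if ov = [] then st.1 else st.1.insert ci.1 ov,
     if nov = [] then st.2 else st.2.insert ci.1 nov)
  else
    (st.1, if ci.2 = [] then st.2 else st.2.insert ci.1 ci.2)

def get_overlap_info_regions2regions_numID_alt (islands : List (String × List (Int × Int))) (regions : List (String × List (Int × Int))) : (List (String × List (Int × Int))) × (List (String × List (Int × Int))) :=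
  let rdict := PySem.Dict.ofList regions
  let fin := (PySem.Dict.ofList islands).items.foldl (pvStepB rdict)
    (PySem.Dict.empty, PySem.Dict.empty)
  (fin.1.items, fin.2.items)

-- ===== PRECONDITION & SPEC =====
-- 'assert leftEnd <= region[0] <= region[1]' along regions[chrom]
def pvChainOK (lo : Int) (rs : List (Int × Int)) : Bool :=
  match rs with
  | [] => true
  | r :: t => decide (lo ≤ r.1) && decide (r.1 ≤ r.2) && pvChainOK r.2 t

-- Pre_ excludes exactly the inputs on which an assert in A fires (AssertionError):
-- for every chrom of islands that is also in regions, regions[chrom] must be a sorted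
-- non-overlapping chain starting at 0 and every island there must have start ≤ end.
def Pre_get_overlap_info_regions2regions_numID (islands : List (String × List (Int × Int))) (regions : List (String × List (Int × Int))) : Prop :=
  ∀ ci ∈ (PySem.Dict.ofList islands).items,
    (PySem.Dict.ofList regions).contains ci.1 = true →
      pvChainOK 0 ((PySem.Dict.ofList regions).getD ci.1 []) = true ∧
      ∀ isl ∈ ci.2, isl.1 ≤ isl.2

instance (islands : List (String × List (Int × Int))) (regions : List (String × List (Int × Int))) : Decidable (Pre_get_overlap_info_regions2regions_numID islands regions) := by unfold Pre_get_overlap_info_regions2regions_numID; infer_instance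

def pvWitness_get_overlap_info_regions2regions_numID : (List (String × List (Int × Int))) × (List (String × List (Int × Int))) :=
  ([("chr1", [(1, 3), (10, 12)]), ("chr2", [(0, 5)])], [("chr1", [(2, 5), (8, 9)])])

def Spec_get_overlap_info_regions2regions_numID (islands : List (String × List (Int × Int))) (regions : List (String × List (Int × Int))) (out : (List (String × List (Int × Int))) × (List (String × List (Int × Int)))) : Prop := out = get_overlap_info_regions2regions_numID_alt islands regions
instance (islands : List (String × List (Int × Int))) (regions : List (String × List (Int × Int))) (out : (List (String × List (Int × Int))) × (List (String × List (Int × Int)))) : Decidable (Spec_get_overlap_info_regions2regions_numID islands regions out) := by unfold Spec_get_overlap_info_regions2regions_numID; infer_instance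

-- ===== CLAIM (what is proved, stated in full; the proofs are below) =====
def Claim_equal_get_overlap_info_regions2regions_numID : Prop := ∀ (islands : List (String × List (Int × Int))) (regions : List (String × List (Int × Int))), Dom_get_overlap_info_regions2regions_numID islands regions → Pre_get_overlap_info_regions2regions_numID islands regions → Spec_get_overlap_info_regions2regions_numID islands regions (get_overlap_info_regions2regions_numID islands regions)

-- ===== LEMMAS AND PROOFS =====

-- proof-side per-island overlap predicate both programs are reduced to
def pvHitsP (rs : List (Int × Int)) (isl : Int × Int) : Bool :=
  let i := PySem.List.bisectRight (rs.map (·.1)) isl.2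
  decide (0 < i) && decide (isl.1 ≤ (rs.map (·.2)).getD (i - 1) 0)

lemma pvChainOK_le_fst (rs : List (Int × Int)) (lo : Int) (h : pvChainOK lo rs = true) :
    ∀ x ∈ rs, lo ≤ x.1 := by
  induction rs generalizing lo with
  | nil => intro x hx; cases hx
  | cons r t ih =>
    simp only [pvChainOK, Bool.and_eq_true, decide_eq_true_eq] at h
    intro x hx
    rcases List.mem_cons.1 hx with rfl | hx
    · exact h.1.1
    · exact le_trans (le_trans h.1.1 h.1.2) (ih r.2 h.2 x hx)

lemma pvChainOK_le_snd (rs : List (Int × Int)) (lo : Int) (h : pvChainOK lo rs = true) :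
    ∀ x ∈ rs, lo ≤ x.2 := by
  induction rs generalizing lo with
  | nil => intro x hx; cases hx
  | cons r t ih =>
    simp only [pvChainOK, Bool.and_eq_true, decide_eq_true_eq] at h
    intro x hx
    rcases List.mem_cons.1 hx with rfl | hx
    · exact le_trans h.1.1 h.1.2
    · exact le_trans (le_trans h.1.1 h.1.2) (ih r.2 h.2 x hx)

lemma pvChainOK_sorted_fst (rs : List (Int × Int)) (lo : Int) (h : pvChainOK lo rs = true) :
    (rs.map (·.1)).Pairwise (· ≤ ·) := by
  induction rs generalizing lo with
  | nil => simp
  | cons r t ih =>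
    simp only [pvChainOK, Bool.and_eq_true, decide_eq_true_eq] at h
    simp only [List.map_cons, List.pairwise_cons]
    constructor
    · intro y hy
      rcases List.mem_map.1 hy with ⟨x, hx, rfl⟩
      exact le_trans h.1.2 (pvChainOK_le_fst t r.2 h.2 x hx)
    · exact ih r.2 h.2

lemma pvChainOK_sorted_snd (rs : List (Int × Int)) (lo : Int) (h : pvChainOK lo rs = true) :
    (rs.map (·.2)).Pairwise (· ≤ ·) := by
  induction rs generalizing lo with
  | nil => simp
  | cons r t ih =>
    simp only [pvChainOK, Bool.and_eq_true, decide_eq_true_eq] at h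
    simp only [List.map_cons, List.pairwise_cons]
    constructor
    · intro y hy
      rcases List.mem_map.1 hy with ⟨x, hx, rfl⟩
      exact pvChainOK_le_snd t r.2 h.2 x hx
    · exact ih r.2 h.2

-- A side: the two-bisect count test equals the predicate, per island
lemma pvTest_eq_hits (rs : List (Int × Int)) (h : pvChainOK 0 rs = true) (island : Int × Int) :
    decide (PySem.List.bisectLeft (rs.map (·.2)) island.1
            < PySem.List.bisectRight (rs.map (·.1)) island.2)
      = pvHitsP rs island := by
  have hs := pvChainOK_sorted_fst rs 0 h
  have he := pvChainOK_sorted_snd rs 0 h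
  obtain ⟨hsle, _hslt, _hsge⟩ := PySem.List.bisectRight_spec (rs.map (·.1)) island.2 hs
  obtain ⟨_hele, helt, hege⟩ := PySem.List.bisectLeft_spec (rs.map (·.2)) island.1 he
  have hlen : (rs.map (·.1)).length = (rs.map (·.2)).length := by simp
  simp only [pvHitsP]
  set e := PySem.List.bisectLeft (rs.map (·.2)) island.1 with hedef
  set s := PySem.List.bisectRight (rs.map (·.1)) island.2 with hsdef
  have key : (e < s) ↔ (0 < s ∧ island.1 ≤ (rs.map (·.2)).getD (s - 1) 0) := by
    constructor
    · intro hlt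
      have hs0 : 0 < s := lt_of_le_of_lt (Nat.zero_le e) hlt
      have hidx : s - 1 < (rs.map (·.2)).length := by omega
      refine ⟨hs0, ?_⟩
      rw [List.getD_eq_getElem (rs.map (·.2)) 0 hidx]
      exact hege (s - 1) hidx (by omega)
    · rintro ⟨hs0, hle⟩
      by_contra hnot
      push Not at hnot
      have hidx : s - 1 < (rs.map (·.2)).length := by omega
      have hblt := helt (s - 1) hidx (by omega)
      rw [List.getD_eq_getElem (rs.map (·.2)) 0 hidx] at hle
      omega
  rw [show (decide (e < s)) = (decide (0 < s ∧ island.1 ≤ (rs.map (·.2)).getD (s - 1) 0)) from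
    decide_eq_decide.2 key, Bool.decide_and]

-- B side, step 1: the while loop lands exactly on bisectRight when started at or left of it
lemma pvAdvance_eq_bisectRight (rs : List (Int × Int)) (e : Int)
    (hs : (rs.map (·.1)).Pairwise (· ≤ ·)) :
    ∀ m j, rs.length - j ≤ m → j ≤ PySem.List.bisectRight (rs.map (·.1)) e →
      pvAdvance rs e j = PySem.List.bisectRight (rs.map (·.1)) e := by
  obtain ⟨hle, hlt, hgt⟩ := PySem.List.bisectRight_spec (rs.map (·.1)) e hs
  have hlen : (rs.map (·.1)).length = rs.length := by simp
  intro m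
  induction m with
  | zero =>
    intro j hm hj
    have hjlen : rs.length ≤ j := by omega
    have : j = PySem.List.bisectRight (rs.map (·.1)) e := by omega
    rw [pvAdvance, dif_neg (by omega)]; exact this
  | succ m ih =>
    intro j hm hj
    rcases Nat.lt_or_ge j (PySem.List.bisectRight (rs.map (·.1)) e) with hlt' | hge
    · have hjr : j < rs.length := by omega
      have hjr' : j < (rs.map (·.1)).length := by omega
      have hxle : rs[j].1 ≤ e := by
        have := hlt j hjr' hlt'
        simpa using this
      rw [pvAdvance, dif_pos hjr, if_pos hxle]
      exact ih (j + 1) (by omega) (by omega)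
    · have hjeq : j = PySem.List.bisectRight (rs.map (·.1)) e := by omega
      by_cases hjr : j < rs.length
      · have hjr' : j < (rs.map (·.1)).length := by omega
        have hxgt : ¬ rs[j].1 ≤ e := by
          have := hgt j hjr' (by omega)
          simp only [List.getElem_map] at this
          omega
        rw [pvAdvance, dif_pos hjr, if_neg hxgt]; exact hjeq
      · rw [pvAdvance, dif_neg hjr]; exact hjeq

-- bisectRight is monotone in the probe (on a sorted list)
lemma pvBisectRight_mono (starts : List Int) (hs : starts.Pairwise (· ≤ ·))
    (e e' : Int) (hee : e ≤ e') :
    PySem.List.bisectRight starts e ≤ PySem.List.bisectRight starts e' := by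
  obtain ⟨hle, hlt, _⟩ := PySem.List.bisectRight_spec starts e hs
  obtain ⟨_, _, hgt'⟩ := PySem.List.bisectRight_spec starts e' hs
  by_contra hcon
  push Not at hcon
  have hidx : PySem.List.bisectRight starts e' < starts.length := by omega
  have h1 := hlt _ hidx hcon
  have h2 := hgt' _ hidx (le_refl _)
  omega

-- getD through the projection
lemma pvGetD_snd (rs : List (Int × Int)) (n : Nat) :
    (rs.getD n (0, 0)).2 = (rs.map (·.2)).getD n 0 := by
  by_cases h : n < rs.length
  · rw [List.getD_eq_getElem rs (0, 0) h, List.getD_eq_getElem _ 0 (by simpa using h)]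
    simp
  · rw [List.getD_eq_default rs (0, 0) (by omega), List.getD_eq_default _ 0 (by simpa using Nat.le_of_not_lt h)]

-- B side, step 2: the sweep fold computes a pure 'set the verdict' fold
lemma pvSweep_fold (rs l : List (Int × Int)) (hs : (rs.map (·.1)).Pairwise (· ≤ ·)) :
    ∀ (order : List Nat) (V : List Bool) (j : Nat),
      (∀ k ∈ order, j ≤ PySem.List.bisectRight (rs.map (·.1)) (l.getD k (0, 0)).2) →
      order.Pairwise (fun a b => (l.getD a (0, 0)).2 ≤ (l.getD b (0, 0)).2) →
      (order.foldl (pvSweepStep rs l) (V, j)).1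
        = order.foldl (fun V k => V.set k (pvHitsP rs (l.getD k (0, 0)))) V := by
  intro order
  induction order with
  | nil => intro V j _ _; rfl
  | cons k0 rest ih =>
    intro V j hj hpw
    obtain ⟨hhead, hpw'⟩ := List.pairwise_cons.1 hpw
    have hadv : pvAdvance rs (l.getD k0 (0, 0)).2 j
        = PySem.List.bisectRight (rs.map (·.1)) (l.getD k0 (0, 0)).2 :=
      pvAdvance_eq_bisectRight rs _ hs rs.length j (by omega) (hj k0 List.mem_cons_self)
    have hval : (decide (0 < pvAdvance rs (l.getD k0 (0, 0)).2 j)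
          && decide ((l.getD k0 (0, 0)).1
            ≤ (rs.getD (pvAdvance rs (l.getD k0 (0, 0)).2 j - 1) (0, 0)).2))
        = pvHitsP rs (l.getD k0 (0, 0)) := by
      rw [hadv, pvGetD_snd rs]; rfl
    simp only [List.foldl_cons, pvSweepStep]
    rw [hval]
    exact ih _ _ (fun k hk => by
        rw [hadv]
        exact pvBisectRight_mono _ hs _ _ (hhead k hk)) hpw'

-- set-folds: indices not in the list are untouched, indices in it get their value
lemma pvSetFold_getD_not_mem (f : Nat → Bool) (order : List Nat) (V : List Bool) (k : Nat)
    (hk : k ∉ order) :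
    (order.foldl (fun V i => V.set i (f i)) V).getD k false = V.getD k false := by
  induction order generalizing V with
  | nil => rfl
  | cons i rest ih =>
    simp only [List.mem_cons] at hk
    push Not at hk
    rw [List.foldl_cons, ih _ hk.2,
      List.getD_eq_getElem?_getD, List.getElem?_set_ne (by omega), ← List.getD_eq_getElem?_getD]

lemma pvSetFold_length (f : Nat → Bool) (order : List Nat) (V : List Bool) :
    (order.foldl (fun V i => V.set i (f i)) V).length = V.length := by
  induction order generalizing V with
  | nil => rfl
  | cons i rest ih => rw [List.foldl_cons, ih, List.length_set]

lemma pvSetFold_getD_mem (f : Nat → Bool) (order : List Nat) (V : List Bool) (k : Nat)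
    (hk : k ∈ order) (hlt : k < V.length) :
    (order.foldl (fun V i => V.set i (f i)) V).getD k false = f k := by
  induction order generalizing V with
  | nil => cases hk
  | cons i rest ih =>
    rw [List.foldl_cons]
    by_cases hkr : k ∈ rest
    · exact ih _ hkr (by rw [List.length_set]; exact hlt)
    · have hki : k = i := by
        rcases List.mem_cons.1 hk with h | h
        · exact h
        · exact absurd h hkr
      subst hki
      rw [pvSetFold_getD_not_mem f rest _ k hkr,
        List.getD_eq_getElem?_getD, List.getElem?_set_self (by omega)]
      simp

-- the verdict list after sweeping a permutation of range n is the map of the predicate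
lemma pvVerdict_eq_map (rs l : List (Int × Int)) (hs : (rs.map (·.1)).Pairwise (· ≤ ·)) :
    ((PySem.List.sorted (List.range l.length) (fun k => (l.getD k (0, 0)).2)).foldl
        (pvSweepStep rs l) (List.replicate l.length false, 0)).1
      = l.map (pvHitsP rs) := by
  set order := PySem.List.sorted (List.range l.length) (fun k => (l.getD k (0, 0)).2) with horder
  have hperm : order.Perm (List.range l.length) := PySem.List.sorted_perm _ _ _
  have hmemall : ∀ k, k < l.length → k ∈ order := fun k hk =>
    hperm.mem_iff.2 (List.mem_range.2 hk)
  rw [pvSweep_fold rs l hs order (List.replicate l.length false) 0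
    (fun k _ => Nat.zero_le _) (PySem.List.sorted_pairwise _ _)]
  apply List.ext_getElem
  · rw [pvSetFold_length, List.length_replicate, List.length_map]
  · intro k h1 h2
    have hkl : k < l.length := by simpa using h2
    have hset := pvSetFold_getD_mem (fun k => pvHitsP rs (l.getD k (0, 0))) order
      (List.replicate l.length false) k (hmemall k hkl) (by simpa using hkl)
    simp only [List.getElem_map]
    rw [← List.getD_eq_getElem l (0, 0) hkl, ← List.getD_eq_getElem _ false h1]
    simpa using hset

-- filtering a list zipped with its own predicate map is just filtering by the predicate
lemma pvZipFilter_pos (l : List (Int × Int)) (p : (Int × Int) → Bool) :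
    (((l.map p).zip l).filter (·.1)).map (·.2) = l.filter p := by
  induction l with
  | nil => rfl
  | cons x t ih =>
    by_cases hx : p x = true <;> simp [List.filter_cons, hx, ih]

lemma pvZipFilter_neg (l : List (Int × Int)) (p : (Int × Int) → Bool) :
    (((l.map p).zip l).filter (fun q => !q.1)).map (·.2) = l.filter (fun x => !p x) := by
  induction l with
  | nil => rfl
  | cons x t ih =>
    by_cases hx : p x = true <;> simp [List.filter_cons, hx, ih]

-- appending one selected element into a dict that already has the key
lemma pvFoldl_modify_insert (l : List (Int × Int)) (p : (Int × Int) → Bool)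
    (d : PySem.Dict String (List (Int × Int))) (c : String) (v : List (Int × Int)) :
    l.foldl (fun d x => if p x then d.modify c [] (· ++ [x]) else d) (d.insert c v)
      = d.insert c (v ++ l.filter p) := by
  induction l generalizing v with
  | nil => simp
  | cons x t ih =>
    rw [List.foldl_cons]
    by_cases hx : p x = true
    · rw [if_pos hx]
      have hstep : (d.insert c v).modify c [] (· ++ [x]) = d.insert c (v ++ [x]) := by
        rw [PySem.Dict.modify, PySem.Dict.getD_insert_self, PySem.Dict.insert_insert_self]
      rw [hstep, ih (v ++ [x])]
      simp [hx]
    · rw [if_neg hx, ih v, List.filter_cons_of_neg (by simp [hx])]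

-- A's lazy append loop over a chrom equals a one-shot insert of the filtered list
lemma pvFoldl_modify (l : List (Int × Int)) (p : (Int × Int) → Bool)
    (d : PySem.Dict String (List (Int × Int))) (c : String) (hc : d.contains c = false) :
    l.foldl (fun d x => if p x then d.modify c [] (· ++ [x]) else d) d
      = if l.filter p = [] then d else d.insert c (l.filter p) := by
  induction l with
  | nil => simp
  | cons x t ih =>
    rw [List.foldl_cons]
    by_cases hx : p x = true
    · rw [if_pos hx]
      have hstep : d.modify c [] (· ++ [x]) = d.insert c ([] ++ [x]) := by
        rw [PySem.Dict.modify, PySem.Dict.getD_of_not_contains d [] hc]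
      rw [hstep, pvFoldl_modify_insert t p d c ([] ++ [x])]
      rw [if_neg (by simp [hx])]
      simp [hx]
    · rw [if_neg hx, ih, List.filter_cons_of_neg (by simp [hx])]

-- a fold that updates the two dict components independently splits
lemma pvFoldl_pair_split {I A B : Type} (l : List I) (q : I → Bool)
    (f : A → I → A) (g : B → I → B) (a : A) (b : B) :
    l.foldl (fun st x => if q x then (f st.1 x, st.2) else (st.1, g st.2 x)) (a, b)
      = (l.foldl (fun a x => if q x then f a x else a) a,
         l.foldl (fun b x => if q x then b else g b x) b) := by
  induction l generalizing a b with
  | nil => rfl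
  | cons x t ih =>
    by_cases hx : q x <;> simp [List.foldl_cons, hx, ih]

-- A's regionStart/regionEnd building loop, projected
lemma pvPre_fold (rs : List (Int × Int)) (xs ys : List Int) (z : Int) :
    (rs.foldl (fun (acc : List Int × List Int × Int) region =>
        (acc.1 ++ [region.1], acc.2.1 ++ [region.2], region.2)) (xs, ys, z)).1
      = xs ++ rs.map (·.1) ∧
    (rs.foldl (fun (acc : List Int × List Int × Int) region =>
        (acc.1 ++ [region.1], acc.2.1 ++ [region.2], region.2)) (xs, ys, z)).2.1
      = ys ++ rs.map (·.2) := by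
  induction rs generalizing xs ys z with
  | nil => simp
  | cons r t ih =>
    simp only [List.foldl_cons, List.map_cons]
    rcases ih (xs ++ [r.1]) (ys ++ [r.2]) r.2 with ⟨h1, h2⟩
    exact ⟨by rw [h1]; simp, by rw [h2]; simp⟩

-- per-chrom: the two steps agree on dicts not yet containing the chrom
lemma pvStep_eq (rdict : PySem.Dict String (List (Int × Int)))
    (ci : String × List (Int × Int))
    (hchain : rdict.contains ci.1 = true → pvChainOK 0 (rdict.getD ci.1 []) = true)
    (ov nov : PySem.Dict String (List (Int × Int)))
    (hov : ov.contains ci.1 = false) (hnov : nov.contains ci.1 = false) :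
    pvStepA rdict (ov, nov) ci = pvStepB rdict (ov, nov) ci := by
  by_cases hc : rdict.contains ci.1 = true
  · -- chrom present in regions
    have hch := hchain hc
    have hsorted := pvChainOK_sorted_fst (rdict.getD ci.1 []) 0 hch
    simp only [pvStepA, pvStepB, hc, Bool.true_eq_false, if_false, if_true]
    obtain h1 := (pvPre_fold (rdict.getD ci.1 []) [] [] 0).1
    obtain h2 := (pvPre_fold (rdict.getD ci.1 []) [] [] 0).2
    rw [h1, h2, List.nil_append, List.nil_append]
    have hfun :
        (fun (st : PySem.Dict String (List (Int × Int)) × PySem.Dict String (List (Int × Int)))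
             (island : Int × Int) =>
          if PySem.List.bisectLeft ((rdict.getD ci.1 []).map (·.2)) island.1
              < PySem.List.bisectRight ((rdict.getD ci.1 []).map (·.1)) island.2 then
            (st.1.modify ci.1 [] (· ++ [island]), st.2)
          else (st.1, st.2.modify ci.1 [] (· ++ [island])))
        = (fun st island =>
          if pvHitsP (rdict.getD ci.1 []) island then
            (st.1.modify ci.1 [] (· ++ [island]), st.2)
          else (st.1, st.2.modify ci.1 [] (· ++ [island]))) := by
      funext st island
      rw [← pvTest_eq_hits (rdict.getD ci.1 []) hch island]
      by_cases hq : PySem.List.bisectLeft ((rdict.getD ci.1 []).map (·.2)) island.1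
          < PySem.List.bisectRight ((rdict.getD ci.1 []).map (·.1)) island.2
      · rw [if_pos hq, if_pos (by simp [hq])]
      · rw [if_neg hq, if_neg (by simp [hq])]
    rw [hfun]
    rw [pvFoldl_pair_split ci.2 (pvHitsP (rdict.getD ci.1 []))
      (fun a island => a.modify ci.1 [] (· ++ [island]))
      (fun b island => b.modify ci.1 [] (· ++ [island])) ov nov]
    have hneg :
        (fun (b : PySem.Dict String (List (Int × Int))) (x : Int × Int) =>
          if pvHitsP (rdict.getD ci.1 []) x then b else b.modify ci.1 [] (· ++ [x]))
        = (fun b x =>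
          if (fun isl => ! pvHitsP (rdict.getD ci.1 []) isl) x then
            b.modify ci.1 [] (· ++ [x]) else b) := by
      funext b x
      by_cases hq : pvHitsP (rdict.getD ci.1 []) x = true
      · rw [if_pos hq, if_neg (by simp [hq])]
      · rw [if_neg hq, if_pos (by simp [Bool.not_eq_true] at hq ⊢; exact hq)]
    rw [hneg, pvFoldl_modify _ _ _ _ hov, pvFoldl_modify _ _ _ _ hnov]
    rw [pvVerdict_eq_map (rdict.getD ci.1 []) ci.2 hsorted,
      pvZipFilter_pos ci.2 (pvHitsP (rdict.getD ci.1 [])),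
      pvZipFilter_neg ci.2 (pvHitsP (rdict.getD ci.1 []))]
  · -- chrom absent from regions
    have hc' : rdict.contains ci.1 = false := by simp [Bool.not_eq_true] at hc; exact hc
    simp only [pvStepA, pvStepB, hc', Bool.false_eq_true, if_true, if_false]
    have hfun :
        (fun (nov : PySem.Dict String (List (Int × Int))) (island : Int × Int) =>
          nov.modify ci.1 [] (· ++ [island]))
        = (fun nov island =>
          if (fun (_ : Int × Int) => true) island then nov.modify ci.1 [] (· ++ [island])
          else nov) := by
      funext nov island; rw [if_pos rfl]
    rw [hfun, pvFoldl_modify _ _ _ _ hnov]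
    simp [List.filter_true]

lemma pvContains_step (d : PySem.Dict String (List (Int × Int))) (c c' : String)
    (v : List (Int × Int)) (hne : c' ≠ c) (hd : d.contains c' = false) :
    (if v = [] then d else d.insert c v).contains c' = false := by
  split_ifs
  · exact hd
  · rw [PySem.Dict.contains_insert]
    simp [hd, hne]

lemma pvOuter (rdict : PySem.Dict String (List (Int × Int)))
    (items : List (String × List (Int × Int)))
    (hnd : (items.map (·.1)).Nodup)
    (hchain : ∀ ci ∈ items, rdict.contains ci.1 = true → pvChainOK 0 (rdict.getD ci.1 []) = true)
    (ov nov : PySem.Dict String (List (Int × Int)))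
    (hov : ∀ ci ∈ items, ov.contains ci.1 = false)
    (hnov : ∀ ci ∈ items, nov.contains ci.1 = false) :
    items.foldl (pvStepA rdict) (ov, nov) = items.foldl (pvStepB rdict) (ov, nov) := by
  induction items generalizing ov nov with
  | nil => rfl
  | cons ci rest ih =>
    rw [List.map_cons] at hnd
    obtain ⟨hnotmem, hnd'⟩ := List.nodup_cons.1 hnd
    have hmem : ci ∈ ci :: rest := List.mem_cons_self
    simp only [List.foldl_cons]
    rw [pvStep_eq rdict ci (hchain ci hmem) ov nov (hov ci hmem) (hnov ci hmem)]
    have hne : ∀ ci' ∈ rest, ci'.1 ≠ ci.1 := by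
      intro ci' h' heq
      exact hnotmem (heq ▸ List.mem_map_of_mem h')
    have hov' : ∀ ci' ∈ rest, (pvStepB rdict (ov, nov) ci).1.contains ci'.1 = false := by
      intro ci' h'
      simp only [pvStepB]
      by_cases hc : rdict.contains ci.1 = true
      · simp only [hc, if_true]
        exact pvContains_step ov ci.1 ci'.1 _ (hne ci' h') (hov ci' (List.mem_cons_of_mem _ h'))
      · simp only [hc]
        exact hov ci' (List.mem_cons_of_mem _ h')
    have hnov' : ∀ ci' ∈ rest, (pvStepB rdict (ov, nov) ci).2.contains ci'.1 = false := by
      intro ci' h'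
      simp only [pvStepB]
      by_cases hc : rdict.contains ci.1 = true
      · simp only [hc, if_true]
        exact pvContains_step nov ci.1 ci'.1 _ (hne ci' h') (hnov ci' (List.mem_cons_of_mem _ h'))
      · simp only [hc]
        exact pvContains_step nov ci.1 ci'.1 _ (hne ci' h') (hnov ci' (List.mem_cons_of_mem _ h'))
    exact ih hnd' (fun ci' h' => hchain ci' (List.mem_cons_of_mem _ h'))
      (pvStepB rdict (ov, nov) ci).1 (pvStepB rdict (ov, nov) ci).2 hov' hnov'

-- ===== VERDICT (by name: the statement is the Claim_ definition above) =====
theorem get_overlap_info_regions2regions_numID_spec : Claim_equal_get_overlap_info_regions2regions_numID := by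
  intro islands regions _hdom hpre
  unfold Spec_get_overlap_info_regions2regions_numID
  simp only [get_overlap_info_regions2regions_numID, get_overlap_info_regions2regions_numID_alt]
  have hnd : ((PySem.Dict.ofList islands).items.map (·.1)).Nodup :=
    PySem.Dict.nodup_keys_ofList islands
  rw [pvOuter (PySem.Dict.ofList regions) (PySem.Dict.ofList islands).items hnd
    (fun ci h hc => (hpre ci h hc).1) PySem.Dict.empty PySem.Dict.empty
    (fun ci _ => PySem.Dict.contains_empty ci.1) (fun ci _ => PySem.Dict.contains_empty ci.1)]
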